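-- pv_equiv track=rewrite | github.com/PicoPlanetDev/computational-math | unit-4/sigmondUnitFourGraded.py | makeTestGrid
-- ===== SOURCE A (Python) =====
-- def makeTestGrid(row,col):
--     s=290797
--     grid=[]
--     for i in range(row):
--         row=[]
--         for j in range(col):
--             s=s*s%50515093
--             row.append(s%500)
--         grid.append(row)
--     return grid
-- ===== SOURCE B (Python) =====
-- def makeTestGrid(row, col):
--     # flat generation then reshape; same return value as the nested version
--     if col <= 0:
--         return [[] for _ in range(row)]
--     s = 290797
--     flat = []
--     for _ in range(max(row, 0) * col):
--         s = s * s % 50515093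
--         flat.append(s % 500)
--     return [flat[i * col:(i + 1) * col] for i in range(row)]
-- ===== Notes on version B (the rewrite author's own statement) =====
-- stated objective: alternative
-- what changed: B generates all row*col PRNG values in one flat loop over a single running state and then reshapes them into rows by slicing, instead of A's nested row-by-row loops.
import Mathlib
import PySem

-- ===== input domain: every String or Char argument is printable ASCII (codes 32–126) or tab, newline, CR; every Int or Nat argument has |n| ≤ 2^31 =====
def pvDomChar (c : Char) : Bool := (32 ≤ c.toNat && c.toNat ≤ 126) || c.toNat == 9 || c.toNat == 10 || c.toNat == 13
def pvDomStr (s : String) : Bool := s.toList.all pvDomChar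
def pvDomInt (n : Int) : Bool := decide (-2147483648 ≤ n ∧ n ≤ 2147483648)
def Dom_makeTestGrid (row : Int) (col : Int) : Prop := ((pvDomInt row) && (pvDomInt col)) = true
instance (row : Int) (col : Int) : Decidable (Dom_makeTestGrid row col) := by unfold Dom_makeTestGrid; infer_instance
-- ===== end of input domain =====

-- B generates the row*col PRNG values in one flat loop and reshapes by slicing, instead of A's nested loops; same return value.

-- ===== PORT A =====
-- nested fold: outer over range(row), inner over range(col); state = (s, accumulated list)
def makeTestGrid (row : Int) (col : Int) : List (List Int) :=
  (((PySem.List.pyRange 0 row 1).foldl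
    (fun (st : Int × List (List Int)) (_ : Int) =>
      let inner := (PySem.List.pyRange 0 col 1).foldl
        (fun (p : Int × List Int) (_ : Int) =>
          let s := PySem.Int.mod (p.1 * p.1) 50515093
          (s, p.2 ++ [PySem.Int.mod s 500])) (st.1, [])
      (inner.1, st.2 ++ [inner.2])) (290797, [])).2)

-- ===== PORT B =====
-- one flat loop over range(row*col), then reshape by slicing (or row empty lists when col <= 0)
def makeTestGrid_alt (row : Int) (col : Int) : List (List Int) :=
  if col ≤ 0 then (PySem.List.pyRange 0 row 1).map (fun _ => [])
  else
    let flat := ((PySem.List.pyRange 0 (max row 0 * col) 1).foldl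
      (fun (p : Int × List Int) (_ : Int) =>
        let s := PySem.Int.mod (p.1 * p.1) 50515093
        (s, p.2 ++ [PySem.Int.mod s 500])) (290797, [])).2
    (PySem.List.pyRange 0 row 1).map
      (fun i => PySem.List.slice flat (some (i * col)) (some ((i + 1) * col)))

-- ===== PRECONDITION & SPEC =====
def Spec_makeTestGrid (row : Int) (col : Int) (out : List (List Int)) : Prop := out = makeTestGrid_alt row col
instance (row : Int) (col : Int) (out : List (List Int)) : Decidable (Spec_makeTestGrid row col out) := by unfold Spec_makeTestGrid; infer_instance

-- ===== CLAIM (what is proved, stated in full; the proofs are below) =====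
def Claim_equal_makeTestGrid : Prop := ∀ (row : Int) (col : Int), Dom_makeTestGrid row col → Spec_makeTestGrid row col (makeTestGrid row col)

-- ===== LEMMAS AND PROOFS =====

-- the PRNG step on (state, emitted values)
def pvStep (p : Int × List Int) : Int × List Int :=
  let s := PySem.Int.mod (p.1 * p.1) 50515093
  (s, p.2 ++ [PySem.Int.mod s 500])

-- n PRNG draws from state s, final state and emitted values (head-first)
def pvGen : Nat → Int → Int × List Int
  | 0, s => (s, [])
  | n + 1, s =>
      let s' := PySem.Int.mod (s * s) 50515093
      let p := pvGen n s'
      (p.1, PySem.Int.mod s' 500 :: p.2)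

-- rows of the grid generated from state s, c values per row (head-first)
def pvGenGrid (c : Nat) : Nat → Int → Int × List (List Int)
  | 0, s => (s, [])
  | r + 1, s =>
      let p := pvGen c s
      let q := pvGenGrid c r p.1
      (q.1, p.2 :: q.2)

theorem pvGen_two_length (n : Nat) (s : Int) : (pvGen n s).2.length = n := by
  induction n generalizing s with
  | zero => rfl
  | succ n ih => simp [pvGen, ih]

theorem pvGen_add (a b : Nat) (s : Int) :
    pvGen (a + b) s = ((pvGen b (pvGen a s).1).1, (pvGen a s).2 ++ (pvGen b (pvGen a s).1).2) := by
  induction a generalizing s with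
  | zero => simp [pvGen]
  | succ a ih =>
      have : a + 1 + b = (a + b) + 1 := by omega
      rw [this]
      simp only [pvGen, ih]
      simp

-- a fold whose function ignores the list elements is an iterate of the step
theorem pvFoldl_ignore {α β : Type} (g : β → β) (l : List α) (init : β) :
    l.foldl (fun p _ => g p) init = g^[l.length] init := by
  induction l generalizing init with
  | nil => rfl
  | cons x xs ih => simp [List.foldl, ih, Function.iterate_succ_apply]

theorem pvStep_iterate (n : Nat) (s : Int) (acc : List Int) :
    pvStep^[n] (s, acc) = ((pvGen n s).1, acc ++ (pvGen n s).2) := by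
  induction n generalizing s acc with
  | zero => simp [pvGen]
  | succ n ih =>
      rw [Function.iterate_succ_apply, pvStep]
      simp only [pvGen, ih]
      simp

-- inner fold of A over range(col) from (s, []) is pvGen col.toNat s
theorem pvInner_eq (col : Int) (s : Int) :
    (PySem.List.pyRange 0 col 1).foldl
      (fun (p : Int × List Int) (_ : Int) =>
        let t := PySem.Int.mod (p.1 * p.1) 50515093
        (t, p.2 ++ [PySem.Int.mod t 500])) (s, [])
      = pvGen col.toNat s := by
  have h : (PySem.List.pyRange 0 col 1).foldl
      (fun (p : Int × List Int) (_ : Int) => pvStep p) (s, [])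
      = pvStep^[(PySem.List.pyRange 0 col 1).length] (s, []) :=
    pvFoldl_ignore pvStep _ _
  have hlen : (PySem.List.pyRange 0 col 1).length = col.toNat := by
    by_cases hc : col ≤ 0
    · have : PySem.List.pyRange 0 col 1 = [] := by
        simp [PySem.List.pyRange]; omega
      simp [this]; omega
    · have : col = ((col.toNat : Nat) : Int) := by omega
      rw [this, PySem.List.pyRange_zero_natCast]
      simp; omega
  simpa [pvStep, hlen, pvStep_iterate] using h

-- the grid step of A on (s, grid)
def pvRowStep (c : Nat) (st : Int × List (List Int)) : Int × List (List Int) :=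
  ((pvGen c st.1).1, st.2 ++ [(pvGen c st.1).2])

theorem pvRowStep_iterate (c r : Nat) (s : Int) (acc : List (List Int)) :
    (pvRowStep c)^[r] (s, acc) = ((pvGenGrid c r s).1, acc ++ (pvGenGrid c r s).2) := by
  induction r generalizing s acc with
  | zero => simp [pvGenGrid]
  | succ r ih =>
      rw [Function.iterate_succ_apply, pvRowStep]
      simp only [pvGenGrid, ih]
      simp

theorem pvA_eq (row col : Int) :
    makeTestGrid row col = (pvGenGrid col.toNat row.toNat 290797).2 := by
  unfold makeTestGrid
  have hstep : (fun (st : Int × List (List Int)) (_ : Int) =>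
      let inner := (PySem.List.pyRange 0 col 1).foldl
        (fun (p : Int × List Int) (_ : Int) =>
          let s := PySem.Int.mod (p.1 * p.1) 50515093
          (s, p.2 ++ [PySem.Int.mod s 500])) (st.1, [])
      (inner.1, st.2 ++ [inner.2]))
      = (fun st (_ : Int) => pvRowStep col.toNat st) := by
    funext st _
    simp only [pvRowStep, pvInner_eq col st.1]
  rw [hstep, pvFoldl_ignore]
  have hlen : (PySem.List.pyRange 0 row 1).length = row.toNat := by
    by_cases hc : row ≤ 0
    · have : PySem.List.pyRange 0 row 1 = [] := by
        simp [PySem.List.pyRange]; omega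
      simp [this]; omega
    · have : row = ((row.toNat : Nat) : Int) := by omega
      rw [this, PySem.List.pyRange_zero_natCast]; simp; omega
  rw [hlen, pvRowStep_iterate]
  simp

theorem pvGenGrid_cons (c r : Nat) (s : Int) :
    (pvGenGrid c (r+1) s).2 = (pvGen c s).2 :: (pvGenGrid c r (pvGen c s).1).2 := by
  simp [pvGenGrid]

-- grid rows are the consecutive length-c chunks of the flat stream
theorem pvChunk (c : Nat) (r : Nat) (s : Int) :
    (List.range r).map (fun k => ((pvGen (r * c) s).2.drop (k * c)).take c)
      = (pvGenGrid c r s).2 := by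
  induction r generalizing s with
  | zero => simp [pvGenGrid]
  | succ r ih =>
      have hsplit : (r + 1) * c = c + r * c := by ring
      rw [hsplit, pvGen_add c (r * c) s]
      set s' := (pvGen c s).1
      have hlen : (pvGen c s).2.length = c := pvGen_two_length c s
      rw [List.range_succ_eq_map]
      simp only [List.map_cons, List.map_map]
      rw [pvGenGrid_cons]
      congr 1
      · simp [hlen]
      · rw [← ih s']
        apply List.map_congr_left
        intro k hk
        have h2 : ((k+1)*c) = (pvGen c s).2.length + k*c := by rw [hlen]; ring
        simp only [Function.comp_apply, Nat.succ_eq_add_one, h2, List.drop_append]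
        have h3 : List.drop ((pvGen c s).2.length + k * c) (pvGen c s).2 = [] :=
          List.drop_eq_nil_of_le (by omega)
        simp [h3]


theorem pvGenGrid_zero (r : Nat) (s : Int) : pvGenGrid 0 r s = (s, List.replicate r []) := by
  induction r generalizing s with
  | zero => simp [pvGenGrid]
  | succ r ih => simp [pvGenGrid, pvGen, ih, List.replicate_succ]

theorem pvLenRange (m : Int) : (PySem.List.pyRange 0 m 1).length = m.toNat := by
  by_cases hc : m ≤ 0
  · have : PySem.List.pyRange 0 m 1 = [] := by
      simp [PySem.List.pyRange]; omega
    simp [this]; omega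
  · have : m = ((m.toNat : Nat) : Int) := by omega
    rw [this, PySem.List.pyRange_zero_natCast]
    simp; omega

-- ===== VERDICT (by name: the statement is the Claim_ definition above) =====
theorem makeTestGrid_spec : Claim_equal_makeTestGrid := by
  intro row col _
  unfold Spec_makeTestGrid makeTestGrid_alt
  rw [pvA_eq]
  by_cases hc : col ≤ 0
  · simp only [if_pos hc]
    have hc0 : col.toNat = 0 := by omega
    rw [hc0, pvGenGrid_zero]
    have : (PySem.List.pyRange 0 row 1).map (fun _ => ([] : List Int))
        = List.replicate (PySem.List.pyRange 0 row 1).length [] := by simp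
    rw [this, pvLenRange]
  · simp only [if_neg hc]
    rw [pvInner_eq (max row 0 * col) 290797]
    by_cases hr : row ≤ 0
    · have h0 : PySem.List.pyRange 0 row 1 = [] := by
        simp [PySem.List.pyRange]; omega
      have hr0 : row.toNat = 0 := by omega
      simp [h0, hr0, pvGenGrid]
    · have hrow : row = ((row.toNat : Nat) : Int) := by omega
      have hcol : col = ((col.toNat : Nat) : Int) := by omega
      have hmax : max row 0 = row := by omega
      have hn : (max row 0 * col).toNat = row.toNat * col.toNat := by
        rw [hmax]
        conv_lhs => rw [hrow, hcol]
        rw [← Nat.cast_mul, Int.toNat_natCast]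
      rw [hn, ← pvChunk col.toNat row.toNat 290797]
      conv_rhs => rw [hrow]
      rw [PySem.List.pyRange_zero_natCast, List.map_map]
      apply List.map_congr_left
      intro k hk
      have e1 : ((k : Int)) * col = (((k * col.toNat : Nat) : Nat) : Int) := by
        conv_lhs => rw [hcol]
        push_cast; ring
      have e2 : ((k : Int) + 1) * col = (((k * col.toNat : Nat) : Nat) : Int) + ((col.toNat : Nat) : Int) := by
        conv_lhs => rw [hcol]
        push_cast; ring
      simp only [Function.comp_apply, e1, e2, PySem.List.slice_natCast_add, Int.toNat_natCast]
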